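-- pv_equiv track=rewrite | github.com/hypercoil/hypercoil | src/hypercoil/nn/atlas.py | set_default_limits
-- ===== SOURCE A (Python) =====
-- from typing import Callable, Dict, Literal, Optional, Tuple, Type
--
-- def set_default_limits(
--     n_locations: Dict[str, int],
-- ) -> Dict[str, Tuple[float, float]]:
--     limits = {}
--     index = 0
--     for c in n_locations.keys():
--         limits[c] = (index, n_locations[c])
--         index += n_locations[c]
--     return limits
-- ===== SOURCE B (Python) =====
-- def set_default_limits(n_locations):
--     # Two-phase: build a prefix-sum offsets table first, then pair keys with
--     # (offset, count) by zipping — instead of threading a running index.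
--     keys = list(n_locations)
--     counts = [n_locations[c] for c in keys]
--     offsets = [0]
--     for v in counts:
--         offsets.append(offsets[-1] + v)
--     return dict(zip(keys, zip(offsets, counts)))
-- ===== Notes on version B (the rewrite author's own statement) =====
-- stated objective: alternative
-- what changed: B replaces the single loop that threads a running index while inserting into the dict by a two-phase construction: it first materialises the counts and a prefix-sum offsets table, then pairs keys with (offset, count) via zip (zip truncation drops the final total).
import Mathlib
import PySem

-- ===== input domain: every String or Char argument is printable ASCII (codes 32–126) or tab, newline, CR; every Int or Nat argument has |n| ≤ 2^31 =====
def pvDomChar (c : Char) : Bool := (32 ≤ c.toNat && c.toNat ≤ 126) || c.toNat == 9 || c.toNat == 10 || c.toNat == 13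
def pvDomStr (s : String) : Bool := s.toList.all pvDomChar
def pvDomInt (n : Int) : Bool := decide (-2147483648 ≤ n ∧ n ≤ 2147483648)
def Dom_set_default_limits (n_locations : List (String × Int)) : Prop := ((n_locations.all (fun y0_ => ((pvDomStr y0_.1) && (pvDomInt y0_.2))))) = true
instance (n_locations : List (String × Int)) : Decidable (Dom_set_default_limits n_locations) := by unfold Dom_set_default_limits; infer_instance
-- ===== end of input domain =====

-- B builds a prefix-sum offsets table first and then zips keys with (offset, count),
-- instead of A's single loop threading a running index while inserting into the dict.

-- ===== PORT A =====
def set_default_limits (n_locations : List (String × Int)) : List (String × Int × Int) :=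
  let d := PySem.Dict.mk n_locations
  let res := d.keys.foldl
    (fun (st : PySem.Dict String (Int × Int) × Int) c =>
      let v := d.getD c 0
      (st.1.insert c (st.2, v), st.2 + v))
    (PySem.Dict.empty, 0)
  res.1.items

-- ===== PORT B =====
def set_default_limits_alt (n_locations : List (String × Int)) : List (String × Int × Int) :=
  let d := PySem.Dict.mk n_locations
  let keys := d.keys
  let counts := keys.map (fun c => d.getD c 0)
  let offsets := counts.foldl (fun os v => os ++ [(PySem.List.pyGet? os (-1)).getD 0 + v]) [0]
  (PySem.Dict.ofList (keys.zip (offsets.zip counts))).items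

-- ===== PRECONDITION & SPEC =====
-- Pre_ excludes association lists with duplicate keys: a Python dict has unique keys,
-- so such lists do not represent any input the Python programs can receive.
def Pre_set_default_limits (n_locations : List (String × Int)) : Prop :=
  (n_locations.map Prod.fst).Nodup
instance (n_locations : List (String × Int)) : Decidable (Pre_set_default_limits n_locations) := by unfold Pre_set_default_limits; infer_instance
def pvWitness_set_default_limits : (List (String × Int)) := [("a", 2), ("b", 3)]

def Spec_set_default_limits (n_locations : List (String × Int)) (out : List (String × Int × Int)) : Prop := out = set_default_limits_alt n_locations
instance (n_locations : List (String × Int)) (out : List (String × Int × Int)) : Decidable (Spec_set_default_limits n_locations out) := by unfold Spec_set_default_limits; infer_instance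

-- ===== CLAIM (what is proved, stated in full; the proofs are below) =====
def Claim_equal_set_default_limits : Prop := ∀ (n_locations : List (String × Int)), Dom_set_default_limits n_locations → Pre_set_default_limits n_locations → Spec_set_default_limits n_locations (set_default_limits n_locations)

-- ===== LEMMAS AND PROOFS =====

-- last element of a snoc list under Python's [-1] indexing
theorem pyGet_snoc_neg_one {α : Type} (l : List α) (a : α) :
    PySem.List.pyGet? (l ++ [a]) (-1) = some a := by
  simp [PySem.List.pyGet?, PySem.List.pyIdx?]

-- B's offsets loop computes a scanl of (+)
theorem offsets_foldl_eq_scanl (vs : List Int) (pre : List Int) (i : Int) :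
    vs.foldl (fun os v => os ++ [(PySem.List.pyGet? os (-1)).getD 0 + v]) (pre ++ [i])
      = pre ++ List.scanl (· + ·) i vs := by
  induction vs generalizing pre i with
  | nil => simp [List.scanl_nil]
  | cons v vs ih =>
    rw [List.scanl_cons, List.foldl_cons]
    simp only [pyGet_snoc_neg_one, Option.getD_some]
    rw [show pre ++ [i] ++ [i + v] = (pre ++ [i]) ++ [i + v] from rfl,
        ih (pre ++ [i]) (i + v)]
    simp

-- A's loop: items of the built dict are keys zipped with (prefix offset, count)
theorem loop_items (f : String → Int) (ks : List String)
    (d0 : PySem.Dict String (Int × Int)) (i : Int)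
    (hfresh : ∀ c ∈ ks, d0.contains c = false) (hnd : ks.Nodup) :
    (ks.foldl (fun (st : PySem.Dict String (Int × Int) × Int) c =>
        (st.1.insert c (st.2, f c), st.2 + f c)) (d0, i)).1.items
      = d0.items ++ ks.zip ((List.scanl (· + ·) i (ks.map f)).zip (ks.map f)) := by
  induction ks generalizing d0 i with
  | nil => simp
  | cons c ks ih =>
    simp only [List.foldl_cons, List.map_cons, List.scanl_cons]
    have hc : d0.contains c = false := hfresh c (List.mem_cons_self ..)
    have hfresh' : ∀ c' ∈ ks, (d0.insert c (i, f c)).contains c' = false := by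
      intro c' hc'
      rw [PySem.Dict.contains_insert]
      have hne : c' ≠ c := by
        intro h; exact (List.nodup_cons.mp hnd).1 (h ▸ hc')
      simp [hne, hfresh c' (List.mem_cons_of_mem _ hc')]
    rw [ih (d0.insert c (i, f c)) (i + f c) hfresh' (List.nodup_cons.mp hnd).2,
        PySem.Dict.items_insert_of_not_contains d0 _ hc]
    simp [List.zip_cons_cons]

-- dict(zip(...)) over distinct keys keeps the pair list as-is
theorem items_ofList_nodup {ν : Type} (l : List (String × ν))
    (h : (l.map Prod.fst).Nodup) : (PySem.Dict.ofList l).items = l := by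
  have := PySem.Dict.items_foldl_insert_fresh (d := (PySem.Dict.empty : PySem.Dict String ν))
      l Prod.fst Prod.snd (by intro a _; exact PySem.Dict.contains_empty _) h
  simpa [PySem.Dict.ofList, PySem.Dict.update] using this

-- ===== VERDICT (by name: the statement is the Claim_ definition above) =====
theorem set_default_limits_spec : Claim_equal_set_default_limits := by
  intro n_locations _ hpre
  unfold Spec_set_default_limits set_default_limits set_default_limits_alt
  dsimp only
  set d := PySem.Dict.mk n_locations with hd
  have hkeys : d.keys = n_locations.map Prod.fst := rfl
  have hnd : d.keys.Nodup := by rw [hkeys]; exact hpre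
  set f : String → Int := fun c => d.getD c 0 with hf
  -- A's side
  rw [loop_items f d.keys PySem.Dict.empty 0
        (by intro c _; exact PySem.Dict.contains_empty _) hnd]
  -- B's side
  have hoff : (d.keys.map f).foldl
      (fun os v => os ++ [(PySem.List.pyGet? os (-1)).getD 0 + v]) [0]
      = List.scanl (· + ·) 0 (d.keys.map f) := by
    have := offsets_foldl_eq_scanl (d.keys.map f) [] 0
    simpa using this
  rw [hoff, items_ofList_nodup]
  · simp [PySem.Dict.empty]
  · -- map fst of the zip is a prefix of the (nodup) key list
    have hlen : d.keys.length ≤ ((List.scanl (· + ·) 0 (d.keys.map f)).zip (d.keys.map f)).length := by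
      simp [List.length_zip, List.length_scanl]
    rw [List.map_fst_zip hlen]
    exact hnd
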